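-- pv_equiv track=rewrite | github.com/kaushalaneesha/Coding-Practice | PythonPractice/src/500_data_structures/arrays/find_index_0_replaced.py | find_index_of_zero2
-- ===== SOURCE A (Python) =====
-- from typing import List
--
-- def find_index_of_zero2(arr: List[int]) -> int:
--     prev_index_zero, max_index_zero = -1, -1
--     count, max_count = 0, 0
--     for i, num in enumerate(arr):
--         if num == 1:
--             count += 1
--         else:
--             # reset count to number of 1s in left plus 1
--             count = i - prev_index_zero
--             prev_index_zero = i
--         if max_count < count:
--             max_count = count
--             max_index_zero = prev_index_zero
--     return max_index_zero
-- ===== SOURCE B (Python) =====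
-- from typing import List
--
-- def find_index_of_zero2(arr: List[int]) -> int:
--     # collect positions of all non-1 elements; each such position z, if replaced
--     # by 1, would join the 1-run before it and after it: candidate = hi - lo - 1
--     # where lo/hi are the neighbouring non-1 positions (sentinels -1 and len(arr)).
--     n = len(arr)
--     zs = [i for i, x in enumerate(arr) if x != 1]
--     best, ans = 0, -1
--     for lo, z, hi in zip([-1] + zs, zs, zs[1:] + [n]):
--         cand = hi - lo - 1
--         if cand > best:
--             best, ans = cand, z
--     return ans
-- ===== Notes on version B (the rewrite author's own statement) =====
-- stated objective: alternative
-- what changed: B replaces A's single-pass counter/previous-zero automaton by first collecting the list of non-1 positions and then scanning neighbouring position triples (lo, z, hi) where each candidate window length is hi - lo - 1, keeping the first strict maximum.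
import Mathlib
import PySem

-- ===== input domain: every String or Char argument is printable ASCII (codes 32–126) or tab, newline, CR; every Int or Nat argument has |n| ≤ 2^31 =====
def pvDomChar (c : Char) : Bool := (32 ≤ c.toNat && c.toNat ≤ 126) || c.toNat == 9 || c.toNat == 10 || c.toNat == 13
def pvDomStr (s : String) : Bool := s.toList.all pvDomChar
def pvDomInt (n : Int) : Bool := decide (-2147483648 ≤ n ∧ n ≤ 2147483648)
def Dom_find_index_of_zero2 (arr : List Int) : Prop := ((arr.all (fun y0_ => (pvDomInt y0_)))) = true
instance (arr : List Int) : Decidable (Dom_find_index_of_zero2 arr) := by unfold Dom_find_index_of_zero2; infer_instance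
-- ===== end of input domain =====

-- B replaces A's single-pass counter automaton by a zero-position list with
-- neighbour-window candidates (alternative decomposition, same O(n) cost).

-- ===== PORT A =====
def find_index_of_zero2 (arr : List Int) : Int :=
  let s := (PySem.List.enumerate arr).foldl
    (fun (st : Int × Int × Int × Int) (p : Int × Int) =>
      let count := if p.2 == 1 then st.2.2.1 + 1 else p.1 - st.1
      let prev := if p.2 == 1 then st.1 else p.1
      if st.2.2.2 < count then (prev, prev, count, count)
      else (prev, st.2.1, count, st.2.2.2))
    (-1, -1, 0, 0)
  s.2.1

-- ===== PORT B =====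
def find_index_of_zero2_alt (arr : List Int) : Int :=
  let n : Int := arr.length
  let zs : List Int :=
    (PySem.List.enumerate arr).filterMap (fun p => if p.2 ≠ 1 then some p.1 else none)
  let r := (List.zip ((-1) :: zs) (List.zip zs (zs.drop 1 ++ [n]))).foldl
    (fun (b : Int × Int) (t : Int × Int × Int) =>
      if t.2.2 - t.1 - 1 > b.1 then (t.2.2 - t.1 - 1, t.2.1) else b)
    (0, -1)
  r.2

-- ===== PRECONDITION & SPEC =====
def Spec_find_index_of_zero2 (arr : List Int) (out : Int) : Prop := out = find_index_of_zero2_alt arr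
instance (arr : List Int) (out : Int) : Decidable (Spec_find_index_of_zero2 arr out) := by unfold Spec_find_index_of_zero2; infer_instance

-- ===== CLAIM (what is proved, stated in full; the proofs are below) =====
def Claim_equal_find_index_of_zero2 : Prop := ∀ (arr : List Int), Dom_find_index_of_zero2 arr → Spec_find_index_of_zero2 arr (find_index_of_zero2 arr)

-- ===== LEMMAS AND PROOFS =====

/-- A's loop step on state (prev, maxIdx, count, maxCount). -/
def pvAStep (st : Int × Int × Int × Int) (p : Int × Int) : Int × Int × Int × Int :=
  let count := if p.2 == 1 then st.2.2.1 + 1 else p.1 - st.1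
  let prev := if p.2 == 1 then st.1 else p.1
  if st.2.2.2 < count then (prev, prev, count, count)
  else (prev, st.2.1, count, st.2.2.2)

/-- B's loop step on (best, ans) with triple (lo, z, hi). -/
def pvZStep (b : Int × Int) (t : Int × Int × Int) : Int × Int :=
  if t.2.2 - t.1 - 1 > b.1 then (t.2.2 - t.1 - 1, t.2.1) else b

/-- Recursive form of B's zipped fold: carries the previous zero `lo`,
    uses sentinel `n` for the last element's right neighbour. -/
def pvGo (lo : Int) (zs : List Int) (b : Int × Int) (n : Int) : Int × Int :=
  match zs with
  | [] => b
  | [z] => pvZStep b (lo, z, n)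
  | z :: z' :: rest => pvGo z (z' :: rest) (pvZStep b (lo, z, z')) n

/-- zero positions of arr -/
def pvZs (arr : List Int) : List Int :=
  (PySem.List.enumerate arr).filterMap (fun p => if p.2 ≠ 1 then some p.1 else none)

def pvRes (arr : List Int) : Int × Int :=
  if pvZs arr = [] then ((arr.length : Int), -1)
  else pvGo (-1) (pvZs arr) (0, -1) (arr.length : Int)

lemma pvZs_append (xs : List Int) (x : Int) :
    pvZs (xs ++ [x]) = pvZs xs ++ (if x = 1 then [] else [(xs.length : Int)]) := by
  simp [pvZs, PySem.List.enumerate_append, PySem.List.enumerate,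
        List.filterMap_append]
  split_ifs with h <;> simp [h]

lemma pvGo_snoc (zs : List Int) (lo b₁ b₂ n w : Int) :
    pvGo lo (zs ++ [w]) (b₁, b₂) n
      = pvZStep (pvGo lo zs (b₁, b₂) w) (zs.getLastD lo, w, n) := by
  induction zs generalizing lo b₁ b₂ with
  | nil => simp [pvGo]
  | cons z rest ih =>
    cases rest with
    | nil => simp [pvGo, List.getLastD]
    | cons z' rest' =>
      have := ih z (pvZStep (b₁, b₂) (lo, z, z')).1 (pvZStep (b₁, b₂) (lo, z, z')).2
      simp [pvGo] at this ⊢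
      simpa [List.getLastD] using this

/-- bridge: B's zip3 fold equals pvGo -/
lemma pvZip_fold_eq_go (zs : List Int) (lo b₁ b₂ n : Int) :
    (List.zip (lo :: zs) (List.zip zs (zs.drop 1 ++ [n]))).foldl pvZStep (b₁, b₂)
      = pvGo lo zs (b₁, b₂) n := by
  induction zs generalizing lo b₁ b₂ with
  | nil => simp [pvGo]
  | cons z rest ih =>
    cases rest with
    | nil => simp [pvGo, pvZStep]
    | cons z' rest' =>
      have := ih z (pvZStep (b₁, b₂) (lo, z, z')).1 (pvZStep (b₁, b₂) (lo, z, z')).2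
      simp [pvGo] at this ⊢
      simpa using this

/-- Characterization of A's fold state in terms of the zero positions. -/
lemma pvA_char (arr : List Int) :
    (PySem.List.enumerate arr).foldl pvAStep (-1, -1, 0, 0)
      = ( (pvZs arr).getLastD (-1),
          (pvRes arr).2,
          (arr.length : Int) - 1 - (((-1) :: pvZs arr).dropLast.getLastD (-1)),
          (pvRes arr).1 ) := by
  induction arr using List.reverseRecOn with
  | nil =>
    simp [pvZs, pvRes, PySem.List.enumerate_nil]
  | append_singleton xs x ih =>
    rw [PySem.List.enumerate_append, List.foldl_append, ih,
        PySem.List.enumerate_cons, PySem.List.enumerate_nil]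
    simp only [List.foldl_cons, List.foldl_nil, zero_add]
    have hlen : (((xs ++ [x]).length : Int)) = (xs.length : Int) + 1 := by
      simp
    by_cases hx : x = 1
    · -- appending a 1: zero list unchanged
      subst hx
      have hzs : pvZs (xs ++ [1]) = pvZs xs := by simp [pvZs_append]
      rcases List.eq_nil_or_concat (pvZs xs) with hz | ⟨ys, w, hz⟩
      · simp [pvAStep, pvRes, hzs, hz]
      · simp only [List.concat_eq_append] at hz
        have hne : pvZs xs ≠ [] := by simp [hz]
        have hne' : pvZs (xs ++ [1]) ≠ [] := by rw [hzs]; exact hne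
        have hR : pvRes xs
            = pvZStep (pvGo (-1) ys (0, -1) w) (ys.getLastD (-1), w, (xs.length : Int)) := by
          unfold pvRes
          rw [if_neg hne, hz, pvGo_snoc]
        have hR' : pvRes (xs ++ [1])
            = pvZStep (pvGo (-1) ys (0, -1) w)
                (ys.getLastD (-1), w, (xs.length : Int) + 1) := by
          unfold pvRes
          rw [if_neg hne', hzs, hz, hlen, pvGo_snoc]
        have hdrop : (((-1 : Int) :: (ys ++ [w])).dropLast).getLastD (-1)
            = ys.getLastD (-1) := by
          rw [show ((-1 : Int) :: (ys ++ [w])) = ((-1 :: ys) ++ [w]) from rfl,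
              List.dropLast_concat, List.getLastD_cons]
        have hgl : (ys ++ [w]).getLastD (-1 : Int) = w := by simp
        rw [hR, hR', hzs, hz, hdrop, hlen, hgl]
        rcases hQ : pvGo (-1) ys (0, -1) w with ⟨q1, q2⟩
        simp only [pvAStep, pvZStep]
        split_ifs <;> simp_all [Prod.ext_iff] <;> omega
    · -- appending a non-1: a new zero position at index xs.length
      have hzs : pvZs (xs ++ [x]) = pvZs xs ++ [(xs.length : Int)] := by
        simp [pvZs_append, hx]
      have hx' : (x == (1 : Int)) = false := by simp [hx]
      rcases List.eq_nil_or_concat (pvZs xs) with hz | ⟨ys, w, hz⟩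
      · have hne' : pvZs (xs ++ [x]) ≠ [] := by simp [hzs]
        have hR : pvRes xs = (((xs.length : Int)), -1) := by
          unfold pvRes; rw [hz, if_pos rfl]
        have hR' : pvRes (xs ++ [x])
            = pvZStep (0, -1) (-1, (xs.length : Int), (xs.length : Int) + 1) := by
          unfold pvRes
          rw [if_neg hne', hzs, hz, hlen]
          simp [pvGo]
        rw [hR, hR', hzs, hz, hlen]
        simp [pvAStep, pvZStep, hx']
      · simp only [List.concat_eq_append] at hz
        have hne : pvZs xs ≠ [] := by simp [hz]
        have hne' : pvZs (xs ++ [x]) ≠ [] := by simp [hzs, hz]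
        have hgl : (ys ++ [w]).getLastD (-1 : Int) = w := by simp
        have hR : pvRes xs
            = pvZStep (pvGo (-1) ys (0, -1) w) (ys.getLastD (-1), w, (xs.length : Int)) := by
          unfold pvRes
          rw [if_neg hne, hz, pvGo_snoc]
        have hR' : pvRes (xs ++ [x])
            = pvZStep (pvZStep (pvGo (-1) ys (0, -1) w)
                (ys.getLastD (-1), w, (xs.length : Int)))
                (w, (xs.length : Int), (xs.length : Int) + 1) := by
          unfold pvRes
          rw [if_neg hne', hzs, hz, hlen, pvGo_snoc (ys ++ [w]), hgl, pvGo_snoc ys]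
        have hdrop : (((-1 : Int) :: (ys ++ [w] ++ [(xs.length : Int)])).dropLast).getLastD (-1)
            = w := by
          rw [show ((-1 : Int) :: (ys ++ [w] ++ [(xs.length : Int)]))
                = ((-1 :: (ys ++ [w])) ++ [(xs.length : Int)]) from rfl,
              List.dropLast_concat, List.getLastD_cons, hgl]
        have hgl2 : (ys ++ [w] ++ [(xs.length : Int)]).getLastD (-1 : Int) = (xs.length : Int) := by
          simp
        rw [hR, hR', hzs, hz, hdrop, hlen, hgl2, hgl]
        rcases hQ : pvGo (-1) ys (0, -1) w with ⟨q1, q2⟩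
        simp only [pvAStep, pvZStep, hx']
        split_ifs <;> simp_all [Prod.ext_iff] <;> omega

theorem pvA_eq_B (arr : List Int) :
    find_index_of_zero2 arr = find_index_of_zero2_alt arr := by
  have hA : find_index_of_zero2 arr
      = ((PySem.List.enumerate arr).foldl pvAStep (-1, -1, 0, 0)).2.1 := rfl
  have hB : find_index_of_zero2_alt arr
      = ((List.zip ((-1) :: pvZs arr)
           (List.zip (pvZs arr) ((pvZs arr).drop 1 ++ [(arr.length : Int)]))).foldl
          pvZStep (0, -1)).2 := rfl
  rw [hA, hB, pvA_char, pvZip_fold_eq_go]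
  rcases List.eq_nil_or_concat (pvZs arr) with hz | ⟨ys, w, hz⟩
  · simp [pvRes, hz, pvGo]
  · simp only [List.concat_eq_append] at hz
    have hne : pvZs arr ≠ [] := by simp [hz]
    simp [pvRes, if_neg hne]

-- ===== VERDICT (by name: the statement is the Claim_ definition above) =====
theorem find_index_of_zero2_spec : Claim_equal_find_index_of_zero2 := by
  intro arr _
  show find_index_of_zero2 arr = find_index_of_zero2_alt arr
  exact pvA_eq_B arr
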